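-- pv_equiv track=rewrite | github.com/BOVIFOCR/Active_liveness-Close_Up_methods | src/CameraCloseUp/FrameSelector.py | __splitInBins
-- ===== SOURCE A (Python) =====
-- def __splitInBins(validFrames,nBins):
--
--     # separate in bins
--     idealBinSize = len(validFrames)//nBins
--     remainer = len(validFrames) - nBins * idealBinSize
--     binList = []
--     currentBin = []
--     for validFrame in validFrames:
--         if remainer > 0:
--             if len(currentBin) >= (idealBinSize + 1):
--                 binList.append(currentBin)
--                 currentBin = []
--                 remainer -= 1
--         else:
--             if len(currentBin) >= idealBinSize:
--                 binList.append(currentBin)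
--                 currentBin = []
--         currentBin.append(validFrame)
--     # append last bin
--     if len(currentBin) > 0:
--         binList.append(currentBin)
--
--     return binList
-- ===== SOURCE B (Python) =====
-- def __splitInBins(validFrames, nBins):
--     # size-table-then-slice: bin i has size q+1 for i < remainer, else q;
--     # only the nonempty bins are emitted (all of them if q > 0, else the first remainer).
--     idealBinSize = len(validFrames) // nBins
--     remainer = len(validFrames) % nBins
--     numBins = nBins if idealBinSize > 0 else remainer
--     binList = []
--     start = 0
--     for i in range(numBins):
--         size = idealBinSize + 1 if i < remainer else idealBinSize
--         binList.append(validFrames[start:start + size])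
--         start += size
--     return binList
-- ===== Notes on version B (the rewrite author's own statement) =====
-- stated objective: simpler
-- what changed: B computes the bin-size table [q+1]*r + [q]*(nBins-r) up front and cuts the list into slices with a cursor, instead of A's element-by-element accumulation with a running threshold and remainder counter.
-- outside the precondition, e.g. on __splitInBins([1, 2], -1): A returns [[], [1], [2]], B returns []; on __splitInBins([1, 2], 0): A raises ZeroDivisionError, B raises ZeroDivisionError
import Mathlib
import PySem

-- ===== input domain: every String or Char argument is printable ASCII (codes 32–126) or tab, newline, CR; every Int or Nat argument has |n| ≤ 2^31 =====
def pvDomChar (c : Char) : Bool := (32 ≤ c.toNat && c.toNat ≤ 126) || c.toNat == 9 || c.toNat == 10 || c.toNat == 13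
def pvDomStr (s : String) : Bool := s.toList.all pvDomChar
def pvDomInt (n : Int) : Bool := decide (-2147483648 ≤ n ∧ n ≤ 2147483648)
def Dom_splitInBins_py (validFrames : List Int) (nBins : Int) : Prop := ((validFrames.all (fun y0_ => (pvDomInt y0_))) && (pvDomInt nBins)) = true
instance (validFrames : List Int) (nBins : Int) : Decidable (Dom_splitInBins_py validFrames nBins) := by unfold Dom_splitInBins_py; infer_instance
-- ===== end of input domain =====

-- B replaces A's element-by-element threshold accumulation by a precomputed bin-size table and a slicing cursor (simpler decomposition, same O(n) cost).


-- ===== PORT A =====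
-- one iteration of A's for-loop; state = (binList, currentBin, remainer)
def stepA (idealBinSize : Int) (st : List (List Int) × List Int × Int) (x : Int) :
    List (List Int) × List Int × Int :=
  let binList := st.1
  let currentBin := st.2.1
  let remainer := st.2.2
  if remainer > 0 then
    if (currentBin.length : Int) ≥ idealBinSize + 1 then
      (binList ++ [currentBin], [x], remainer - 1)
    else
      (binList, currentBin ++ [x], remainer)
  else
    if (currentBin.length : Int) ≥ idealBinSize then
      (binList ++ [currentBin], [x], remainer)
    else
      (binList, currentBin ++ [x], remainer)

def splitInBins_py (validFrames : List Int) (nBins : Int) : List (List Int) :=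
  let idealBinSize := PySem.Int.floordiv (validFrames.length : Int) nBins
  let remainer := (validFrames.length : Int) - nBins * idealBinSize
  let st := validFrames.foldl (stepA idealBinSize) ([], [], remainer)
  if st.2.1.length > 0 then st.1 ++ [st.2.1] else st.1

-- ===== PORT B =====
-- one iteration of B's for-loop over the bin indices; state = (binList, start)
def stepB (validFrames : List Int) (remainer idealBinSize : Int)
    (st : List (List Int) × Int) (i : Int) : List (List Int) × Int :=
  let size := if i < remainer then idealBinSize + 1 else idealBinSize
  (st.1 ++ [PySem.List.slice validFrames (some st.2) (some (st.2 + size))], st.2 + size)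

def splitInBins_py_alt (validFrames : List Int) (nBins : Int) : List (List Int) :=
  let idealBinSize := PySem.Int.floordiv (validFrames.length : Int) nBins
  let remainer := PySem.Int.mod (validFrames.length : Int) nBins
  let numBins := if idealBinSize > 0 then nBins else remainer
  ((PySem.List.pyRange 0 numBins 1).foldl (stepB validFrames remainer idealBinSize) ([], 0)).1

-- ===== PRECONDITION & SPEC =====
-- Pre_ excludes nBins ≤ 0: nBins = 0 makes A raise ZeroDivisionError, and a negative bin
-- count is outside the task's natural domain (there A's value — a leading empty bin and
-- singleton bins — is an artefact of floor division, and B naturally returns []).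
def Pre_splitInBins_py (validFrames : List Int) (nBins : Int) : Prop := 1 ≤ nBins
instance (validFrames : List Int) (nBins : Int) : Decidable (Pre_splitInBins_py validFrames nBins) := by unfold Pre_splitInBins_py; infer_instance
def pvWitness_splitInBins_py : List Int × Int := ([3, 1, 4, 1, 5], 2)

def Spec_splitInBins_py (validFrames : List Int) (nBins : Int) (out : List (List Int)) : Prop := out = splitInBins_py_alt validFrames nBins
instance (validFrames : List Int) (nBins : Int) (out : List (List Int)) : Decidable (Spec_splitInBins_py validFrames nBins out) := by unfold Spec_splitInBins_py; infer_instance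

-- ===== CLAIM (what is proved, stated in full; the proofs are below) =====
def Claim_equal_splitInBins_py : Prop := ∀ (validFrames : List Int) (nBins : Int), Dom_splitInBins_py validFrames nBins → Pre_splitInBins_py validFrames nBins → Spec_splitInBins_py validFrames nBins (splitInBins_py validFrames nBins)

-- ===== LEMMAS AND PROOFS =====

-- common reference form: cut xs into consecutive chunks of the given sizes, skipping size 0
def chunksOf : List Nat → List Int → List (List Int)
  | [], _ => []
  | s :: ss, xs => (if s = 0 then [] else [xs.take s]) ++ chunksOf ss (xs.drop s)
theorem chunksOf_sum_zero (szs : List Nat) (xs : List Int) (h : szs.sum = 0) :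
    chunksOf szs xs = [] := by
  induction szs generalizing xs with
  | nil => rfl
  | cons s ss ih =>
    simp only [List.sum_cons] at h
    simp [chunksOf, Nat.eq_zero_of_add_eq_zero_right h, ih _ (by omega)]
theorem stepA_loop (q : Nat) :
    ∀ (xs : List Int) (rem m : Nat) (acc : List (List Int)) (cur : List Int),
    cur.length + xs.length = (List.replicate rem (q+1) ++ List.replicate m q).sum →
    cur.length ≤ (if rem = 0 then q else q + 1) →
    (let st := xs.foldl (stepA (q : Int)) (acc, cur, (rem : Int));
     if st.2.1.length > 0 then st.1 ++ [st.2.1] else st.1)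
      = acc ++ chunksOf (List.replicate rem (q+1) ++ List.replicate m q) (cur ++ xs) := by
  intro xs
  induction xs with
  | nil =>
    intro rem m acc cur hsum hle
    simp only [List.sum_append, List.sum_replicate, smul_eq_mul, List.length_nil,
      Nat.add_zero] at hsum
    simp only [List.foldl_nil, List.append_nil]
    by_cases hcur : cur = []
    · subst hcur
      simp only [List.length_nil] at hsum ⊢
      rw [chunksOf_sum_zero]
      · simp
      · simp only [List.sum_append, List.sum_replicate, smul_eq_mul]; omega
    · have hlen : 0 < cur.length := List.length_pos_iff.mpr hcur
      rcases Nat.eq_zero_or_pos rem with hrem | hrem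
      · subst hrem
        rw [if_pos rfl] at hle
        simp only [Nat.zero_mul, Nat.zero_add] at hsum
        have hm : 0 < m := by
          rcases Nat.eq_zero_or_pos m with h | h
          · exfalso; rw [h, Nat.zero_mul] at hsum; omega
          · exact h
        have hq : cur.length = q := by nlinarith
        obtain ⟨m', rfl⟩ : ∃ m', m = m' + 1 := ⟨m - 1, by omega⟩
        have hexp : (m' + 1) * q = m' * q + q := by ring
        have hrest : (List.replicate m' q).sum = 0 := by
          simp only [List.sum_replicate, smul_eq_mul]; omega
        have htake : cur.take q = cur := by rw [← hq]; exact List.take_length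
        have hdrop : cur.drop q = [] := by rw [← hq]; exact List.drop_length
        simp only [List.replicate_zero, List.nil_append, List.replicate_succ, chunksOf,
          if_neg (by omega : ¬ q = 0), htake, hdrop, chunksOf_sum_zero _ _ hrest]
        simp [hlen]
      · have hne : rem ≠ 0 := by omega
        rw [if_neg hne] at hle
        have ht : q + 1 ≤ rem * (q+1) + m * q := by nlinarith
        have hq : cur.length = q + 1 := by omega
        obtain ⟨r', rfl⟩ : ∃ r', rem = r' + 1 := ⟨rem - 1, by omega⟩
        have hexp : (r' + 1) * (q + 1) = r' * (q + 1) + (q + 1) := by ring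
        have hrest : (List.replicate r' (q+1) ++ List.replicate m q).sum = 0 := by
          simp only [List.sum_append, List.sum_replicate, smul_eq_mul]; omega
        have htake : cur.take (q+1) = cur := by rw [← hq]; exact List.take_length
        have hdrop : cur.drop (q+1) = [] := by rw [← hq]; exact List.drop_length
        simp only [List.replicate_succ, List.cons_append, chunksOf,
          if_neg (by omega : ¬ q + 1 = 0), htake, hdrop, chunksOf_sum_zero _ _ hrest]
        simp [hlen]
  | cons x rest ih =>
    intro rem m acc cur hsum hle
    simp only [List.sum_append, List.sum_replicate, smul_eq_mul, List.length_cons] at hsum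
    rcases Nat.lt_or_ge cur.length (if rem = 0 then q else q + 1) with hlt | hge
    · -- bin not yet full: element joins currentBin
      have hstep : stepA (q : Int) (acc, cur, (rem : Int)) x = (acc, cur ++ [x], (rem : Int)) := by
        rcases Nat.eq_zero_or_pos rem with h0 | h0
        · subst h0
          rw [if_pos rfl] at hlt
          simp only [stepA]
          split_ifs with h1 h2 h2 <;> first | rfl | (exfalso; omega)
        · rw [if_neg (by omega : ¬ rem = 0)] at hlt
          simp only [stepA]
          split_ifs with h1 h2 h2 <;> first | rfl | (exfalso; omega)
      simp only [List.foldl_cons, hstep]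
      have := ih rem m acc (cur ++ [x])
        (by simp only [List.sum_append, List.sum_replicate, smul_eq_mul,
              List.length_append, List.length_cons, List.length_nil]; omega)
        (by simp only [List.length_append, List.length_cons, List.length_nil]; omega)
      simpa [List.append_assoc] using this
    · -- bin full: it is closed and x starts the next bin
      have hcl : cur.length = (if rem = 0 then q else q + 1) := le_antisymm hle hge
      rcases Nat.eq_zero_or_pos rem with h0 | h0
      · -- rem = 0 close
        subst h0
        rw [if_pos rfl] at hcl
        simp only [Nat.zero_mul, Nat.zero_add] at hsum
        have hq : 0 < q := by
          rcases Nat.eq_zero_or_pos q with h | h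
          · exfalso; rw [h, Nat.mul_zero] at hsum; omega
          · exact h
        have hm : 0 < m := by
          rcases Nat.eq_zero_or_pos m with h | h
          · exfalso; rw [h, Nat.zero_mul] at hsum; omega
          · exact h
        obtain ⟨m', rfl⟩ : ∃ m', m = m' + 1 := ⟨m - 1, by omega⟩
        have hexp : (m' + 1) * q = m' * q + q := by ring
        have hstep : stepA (q : Int) (acc, cur, ((0:Nat) : Int)) x
            = (acc ++ [cur], [x], ((0:Nat) : Int)) := by
          simp only [stepA]
          split_ifs with h1 h2 h2 <;> first | rfl | (exfalso; omega)
        simp only [List.foldl_cons, hstep]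
        have := ih 0 m' (acc ++ [cur]) [x]
          (by simp only [List.sum_append, List.sum_replicate, smul_eq_mul,
                List.replicate_zero, List.sum_nil, List.length_cons, List.length_nil, Nat.zero_add]; omega)
          (by rw [if_pos rfl]; simp only [List.length_cons, List.length_nil]; omega)
        rw [this]
        have htake : (cur ++ x :: rest).take q = cur := by
          rw [← hcl]; exact List.take_left
        have hdrop : (cur ++ x :: rest).drop q = x :: rest := by
          rw [← hcl]; exact List.drop_left
        simp [List.replicate_succ, chunksOf, htake, hdrop, hq.ne']
      · -- rem > 0 close
        have hne : rem ≠ 0 := by omega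
        rw [if_neg hne] at hcl
        obtain ⟨r', rfl⟩ : ∃ r', rem = r' + 1 := ⟨rem - 1, by omega⟩
        have hexp : (r' + 1) * (q + 1) = r' * (q + 1) + (q + 1) := by ring
        have hstep : stepA (q : Int) (acc, cur, ((r' + 1 : Nat) : Int)) x
            = (acc ++ [cur], [x], ((r' : Nat) : Int)) := by
          simp only [stepA]
          split_ifs with h1 h2 h2
          · simp only [Prod.mk.injEq, true_and]
            push_cast; ring
          all_goals exfalso; omega
        simp only [List.foldl_cons, hstep]
        have := ih r' m (acc ++ [cur]) [x]
          (by simp only [List.sum_append, List.sum_replicate, smul_eq_mul,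
                List.length_cons, List.length_nil]; omega)
          (by rcases Nat.eq_zero_or_pos r' with h1 | h1
              · subst h1
                rw [if_pos rfl]
                simp only [List.length_cons, List.length_nil]
                rcases Nat.eq_zero_or_pos q with hq | hq
                · exfalso; rw [hq] at hsum hexp; simp only [Nat.mul_zero] at hsum; omega
                · omega
              · rw [if_neg (by omega : ¬ r' = 0)]
                simp)
        rw [this]
        have htake : (cur ++ x :: rest).take (q+1) = cur := by
          rw [← hcl]; exact List.take_left
        have hdrop : (cur ++ x :: rest).drop (q+1) = x :: rest := by
          rw [← hcl]; exact List.drop_left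
        simp [List.replicate_succ, chunksOf, htake, hdrop]

-- the size of bin i
def binSize (r q i : Nat) : Nat := if i < r then q + 1 else q

-- zero sizes at the end of the table contribute no bins
theorem chunksOf_append_zeros (szs : List Nat) (k : Nat) (xs : List Int) :
    chunksOf (szs ++ List.replicate k 0) xs = chunksOf szs xs := by
  induction szs generalizing xs with
  | nil =>
    induction k generalizing xs with
    | zero => simp [chunksOf]
    | succ k ih => simp only [List.nil_append, List.replicate_succ, chunksOf] at *; simp [ih]
  | cons s ss ih => simp [chunksOf, ih]

-- the index-to-size table is two blocks of replicated sizes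
theorem range_map_binSize (n r a c : Nat) (hrn : r ≤ n) :
    (List.range n).map (fun j => if j < r then a else c)
      = List.replicate r a ++ List.replicate (n - r) c := by
  apply List.ext_getElem
  · simp; omega
  · intro i h1 h2
    simp only [List.getElem_map, List.getElem_range]
    rcases Nat.lt_or_ge i r with h | h
    · rw [if_pos h, List.getElem_append_left (by simpa using h), List.getElem_replicate]
    · rw [if_neg (by omega), List.getElem_append_right (by simpa using h),
        List.getElem_replicate]

-- B's fold over the bin indices computes chunksOf of the size table
theorem stepB_fold (xs : List Int) (rN qN : Nat) :
    ∀ (L : List Nat) (start : Nat) (acc : List (List Int)),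
    (∀ j ∈ L, 0 < binSize rN qN j) →
    (List.foldl (fun st (j : Nat) => stepB xs (rN : Int) (qN : Int) st (j : Int))
        (acc, (start : Int)) L).1
      = acc ++ chunksOf (L.map (binSize rN qN)) (xs.drop start) := by
  intro L
  induction L with
  | nil => intro start acc _; simp [chunksOf]
  | cons j L' ih =>
    intro start acc hpos
    have hjpos : 0 < binSize rN qN j := hpos j (by simp)
    have hsz : (if (j : Int) < (rN : Int) then (qN : Int) + 1 else (qN : Int))
        = ((binSize rN qN j : Nat) : Int) := by
      unfold binSize; split_ifs with h1 h2 h2 <;> push_cast <;> first | rfl | omega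
    have hslice : PySem.List.slice xs (some (start : Int))
          (some ((start : Int) + ((binSize rN qN j : Nat) : Int)))
        = (xs.drop start).take (binSize rN qN j) :=
      PySem.List.slice_natCast_add xs start (binSize rN qN j)
    have hcast : ((start : Int) + ((binSize rN qN j : Nat) : Int))
        = ((start + binSize rN qN j : Nat) : Int) := by push_cast; ring
    have hstep : stepB xs (rN : Int) (qN : Int) (acc, (start : Int)) (j : Int)
        = (acc ++ [(xs.drop start).take (binSize rN qN j)],
           ((start + binSize rN qN j : Nat) : Int)) := by
      have hslice' : PySem.List.slice xs (some (start : Int))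
            (some ((start + binSize rN qN j : Nat) : Int))
          = (xs.drop start).take (binSize rN qN j) := by rw [← hcast]; exact hslice
      simp only [stepB, hsz, hcast, hslice']
    rw [List.foldl_cons, hstep, ih (start + binSize rN qN j) _
      (fun j hj => hpos j (by simp [hj]))]
    simp [chunksOf, List.drop_drop]
    rw [if_neg (by omega : ¬ binSize rN qN j = 0)]
    rfl

-- ===== VERDICT (by name: the statement is the Claim_ definition above) =====
theorem splitInBins_py_spec : Claim_equal_splitInBins_py := by
  intro validFrames nBins _ hpre
  unfold Spec_splitInBins_py
  unfold Pre_splitInBins_py at hpre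
  obtain ⟨b, rfl⟩ : ∃ b : Nat, nBins = (b : Int) := ⟨nBins.toNat, (Int.toNat_of_nonneg (by omega)).symm⟩
  have hb : 0 < b := by exact_mod_cast hpre
  set n := validFrames.length with hn
  set q := n / b with hq
  set r := n % b with hr
  have hrb : r ≤ b := le_of_lt (Nat.mod_lt _ hb)
  have hfd : PySem.Int.floordiv (n : Int) (b : Int) = ((q : Nat) : Int) :=
    PySem.Int.floordiv_natCast n b
  have hmod : PySem.Int.mod (n : Int) (b : Int) = ((r : Nat) : Int) :=
    PySem.Int.mod_natCast n b
  have hrem : (n : Int) - (b : Int) * ((q : Nat) : Int) = ((r : Nat) : Int) := by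
    rw [hq, hr]
    have h' : ((b * (n / b) + n % b : Nat) : Int) = (n : Int) := by
      exact_mod_cast congrArg (Nat.cast : Nat → Int) (Nat.div_add_mod n b)
    push_cast at h' ⊢
    omega
  -- A side
  have hA : splitInBins_py validFrames (b : Int)
      = chunksOf (List.replicate r (q+1) ++ List.replicate (b - r) q) validFrames := by
    unfold splitInBins_py
    simp only [← hn, hfd, hrem]
    have := stepA_loop q validFrames r (b - r) [] []
      (by simp only [List.sum_append, List.sum_replicate, smul_eq_mul,
            List.length_nil, Nat.zero_add]
          have := Nat.div_add_mod n b
          have : b * q + r = n := this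
          nlinarith [Nat.sub_add_cancel hrb])
      (by simp)
    simpa using this
  -- B side
  have hB : splitInBins_py_alt validFrames (b : Int)
      = chunksOf (List.replicate r (q+1) ++ List.replicate (b - r) q) validFrames := by
    unfold splitInBins_py_alt
    simp only [← hn, hfd, hmod]
    by_cases hq0 : 0 < q
    · rw [if_pos (by exact_mod_cast hq0 : ((q : Nat) : Int) > 0), PySem.List.pyRange_one]
      simp only [sub_zero, Int.toNat_natCast, List.foldl_map, zero_add]
      have hfold := stepB_fold validFrames r q (List.range b) 0 []
        (by intro j hj; unfold binSize; split_ifs <;> omega)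
      simp only [Nat.cast_zero, List.drop_zero, List.nil_append] at hfold
      rw [hfold]
      rw [show binSize r q = fun j => if j < r then q + 1 else q from funext fun j => rfl,
        range_map_binSize b r (q+1) q hrb]
    · rw [if_neg (by exact_mod_cast hq0 : ¬ ((q : Nat) : Int) > 0), PySem.List.pyRange_one]
      simp only [sub_zero, Int.toNat_natCast, List.foldl_map, zero_add]
      have hfold := stepB_fold validFrames r q (List.range r) 0 []
        (by intro j hj; unfold binSize
            rw [if_pos (by simpa using hj)]; exact Nat.succ_pos _)
      simp only [Nat.cast_zero, List.drop_zero, List.nil_append] at hfold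
      rw [hfold]
      rw [show binSize r q = fun j => if j < r then q + 1 else q from funext fun j => rfl,
        range_map_binSize r r (q+1) q le_rfl]
      have hq' : q = 0 := Nat.eq_zero_of_not_pos hq0
      rw [hq', Nat.sub_self, List.replicate_zero, List.append_nil,
        ← chunksOf_append_zeros (List.replicate r (0+1)) (b - r) validFrames]
  rw [hA, hB]
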